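-- pv_equiv track=rewrite | github.com/NifTK/NifTK | Code/nipype-workflows/seg-gif/seg_gif_create_template_library.py | generate_pair_files
-- ===== SOURCE A (Python) =====
-- def generate_pair_files(in_files):
--     ref_files = []
--     flo_files = []
--
--     for i in range(len(in_files)):
--         for j in range(i+1, len(in_files)):
--             ref_files.append(in_files[i])
--             flo_files.append(in_files[j])
--
--     return ref_files, flo_files
-- ===== SOURCE B (Python) =====
-- def generate_pair_files(in_files):
--     pairs = []
--     suffix = list(in_files)
--     while suffix:
--         head = suffix.pop(0)
--         pairs.extend((head, y) for y in suffix)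
--     return [p[0] for p in pairs], [p[1] for p in pairs]
-- ===== Notes on version B (the rewrite author's own statement) =====
-- stated objective: idiomatic
-- what changed: B materialises a single list of (ref, flo) pairs by iterating over shrinking suffixes (pop the head, pair it with each remaining element) and then transposes that pair list into the two columns, instead of A growing two lists in lockstep inside nested index loops.
import Mathlib
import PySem

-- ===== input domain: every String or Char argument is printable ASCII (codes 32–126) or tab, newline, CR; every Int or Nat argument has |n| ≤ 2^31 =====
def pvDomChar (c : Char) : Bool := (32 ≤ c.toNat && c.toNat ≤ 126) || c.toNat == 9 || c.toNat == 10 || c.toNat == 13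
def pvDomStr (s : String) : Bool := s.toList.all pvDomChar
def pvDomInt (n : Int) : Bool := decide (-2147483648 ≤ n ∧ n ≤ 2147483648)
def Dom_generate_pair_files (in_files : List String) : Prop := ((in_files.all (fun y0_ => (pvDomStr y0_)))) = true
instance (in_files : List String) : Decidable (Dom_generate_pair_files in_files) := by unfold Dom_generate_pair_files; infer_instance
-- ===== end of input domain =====

-- B builds the (ref, flo) combination pairs by structural recursion and transposes them,
-- instead of A's nested index loops growing two lists in lockstep (objective: idiomatic).

-- ===== PORT A =====
-- for i in range(len(in_files)): for j in range(i+1, len(in_files)): append in_files[i] / in_files[j]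
def generate_pair_files (in_files : List String) : List String × List String :=
  (PySem.List.pyRange 0 (in_files.length : Int) 1).foldl
    (fun (acc : List String × List String) i =>
      (PySem.List.pyRange (i + 1) (in_files.length : Int) 1).foldl
        (fun (acc2 : List String × List String) j =>
          (acc2.1 ++ [PySem.List.pyGetD in_files i ""],
           acc2.2 ++ [PySem.List.pyGetD in_files j ""])) acc)
    ([], [])

-- ===== PORT B =====
-- the while loop pops the head of the shrinking suffix and extends pairs with (head, y)
-- for the remaining y; transcribed as structural recursion on the suffix, then the two
-- column comprehensions become the two maps
def pvCombos (xs : List String) : List (String × String) :=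
  match xs with
  | [] => []
  | head :: suffix => suffix.map (fun y => (head, y)) ++ pvCombos suffix

def generate_pair_files_alt (in_files : List String) : List String × List String :=
  let pairs := pvCombos in_files
  (pairs.map Prod.fst, pairs.map Prod.snd)

-- ===== PRECONDITION & SPEC =====
def Spec_generate_pair_files (in_files : List String) (out : List String × List String) : Prop := out = generate_pair_files_alt in_files
instance (in_files : List String) (out : List String × List String) : Decidable (Spec_generate_pair_files in_files out) := by unfold Spec_generate_pair_files; infer_instance

-- ===== CLAIM (what is proved, stated in full; the proofs are below) =====
def Claim_equal_generate_pair_files : Prop := ∀ (in_files : List String), Dom_generate_pair_files in_files → Spec_generate_pair_files in_files (generate_pair_files in_files)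

-- ===== LEMMAS AND PROOFS =====

-- the inner accumulation over a plain list of values
lemma pv_fold_pairs (t : List String) (c : String) (acc : List String × List String) :
    t.foldl (fun (a : List String × List String) v => (a.1 ++ [c], a.2 ++ [v])) acc
      = (acc.1 ++ List.replicate t.length c, acc.2 ++ t) := by
  induction t generalizing acc with
  | nil => simp
  | cons y ys ih =>
      rw [List.foldl_cons, ih]
      simp [List.replicate_succ, List.append_assoc]

-- outer loop invariant: starting at index a, the loop appends the transposed combos of the suffix
lemma pv_outer (xs : List String) (a : Nat) (acc : List String × List String) :
    (PySem.List.pyRange (a : Int) (xs.length : Int) 1).foldl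
      (fun (acc : List String × List String) i =>
        (PySem.List.pyRange (i + 1) (xs.length : Int) 1).foldl
          (fun (acc2 : List String × List String) j =>
            (acc2.1 ++ [PySem.List.pyGetD xs i ""],
             acc2.2 ++ [PySem.List.pyGetD xs j ""])) acc)
      acc
      = (acc.1 ++ (pvCombos (xs.drop a)).map Prod.fst,
         acc.2 ++ (pvCombos (xs.drop a)).map Prod.snd) := by
  induction h : xs.length - a generalizing a acc with
  | zero =>
      have hle : xs.length ≤ a := by omega
      rw [PySem.List.pyRange_one_eq_nil (by exact_mod_cast hle)]
      simp [List.drop_eq_nil_of_le hle, pvCombos]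
  | succ n ih =>
      have hlt : a < xs.length := by omega
      rw [PySem.List.pyRange_one_cons (by exact_mod_cast hlt)]
      simp only [List.foldl_cons]
      have hcast : ((a : Int) + 1) = ((a + 1 : Nat) : Int) := by push_cast; ring
      rw [hcast, PySem.List.foldl_pyRange_pyGetD' xs ""
        (fun acc2 v => (acc2.1 ++ [PySem.List.pyGetD xs (a : Int) ""], acc2.2 ++ [v])) acc
        (by positivity)]
      have hga : PySem.List.pyGetD xs (a : Int) "" = xs[a] := by
        rw [PySem.List.pyGetD_natCast]; exact List.getD_eq_getElem xs "" hlt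
      simp only [Int.toNat_natCast, hga]
      rw [pv_fold_pairs]
      rw [ih (a + 1) _ (by omega)]
      have hdrop : xs.drop a = xs[a] :: xs.drop (a + 1) := List.drop_eq_getElem_cons hlt
      rw [hdrop]
      simp only [pvCombos, List.map_append, List.map_map]
      simp [Function.comp_def, List.map_const', List.append_assoc]

-- ===== VERDICT (by name: the statement is the Claim_ definition above) =====
theorem generate_pair_files_spec : Claim_equal_generate_pair_files := by
  intro xs _
  show _ = _
  unfold generate_pair_files generate_pair_files_alt
  have h0 : (0 : Int) = ((0 : Nat) : Int) := rfl
  rw [h0, pv_outer xs 0 ([], [])]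
  simp
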